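-- pv_equiv track=rewrite | github.com/nazari-ai/nazari-backend | api/query.py | agg_sentiment
-- ===== SOURCE A (Python) =====
-- from typing import List, Optional
--
-- def agg_sentiment(sentiment: List):
--
--     """
--     Custom function for sentiment aggregation
--     """
--
--     senti_dict = {"positive": 0, "negative": 0, "neutral": 0}
--     for s in sentiment:
--         if s > 0:
--             senti_dict["positive"] += 1
--         elif s < 0:
--             senti_dict["negative"] += 1
--         else:
--             senti_dict["neutral"] += 1
--
--     return senti_dict
-- ===== SOURCE B (Python) =====
-- from typing import List, Optional
--
-- def agg_sentiment(sentiment: List):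
--     """
--     Custom function for sentiment aggregation
--     """
--     positive = sum(1 for s in sentiment if s > 0)
--     negative = sum(1 for s in sentiment if s < 0)
--     neutral = sum(1 for s in sentiment if not (s > 0 or s < 0))
--     return {"positive": positive, "negative": negative, "neutral": neutral}
-- ===== Notes on version B (the rewrite author's own statement) =====
-- stated objective: alternative
-- what changed: Replaces the single interleaved branching loop over a mutable dict with three independent filtered-count passes whose results are assembled into the dict at the end.
import Mathlib
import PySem

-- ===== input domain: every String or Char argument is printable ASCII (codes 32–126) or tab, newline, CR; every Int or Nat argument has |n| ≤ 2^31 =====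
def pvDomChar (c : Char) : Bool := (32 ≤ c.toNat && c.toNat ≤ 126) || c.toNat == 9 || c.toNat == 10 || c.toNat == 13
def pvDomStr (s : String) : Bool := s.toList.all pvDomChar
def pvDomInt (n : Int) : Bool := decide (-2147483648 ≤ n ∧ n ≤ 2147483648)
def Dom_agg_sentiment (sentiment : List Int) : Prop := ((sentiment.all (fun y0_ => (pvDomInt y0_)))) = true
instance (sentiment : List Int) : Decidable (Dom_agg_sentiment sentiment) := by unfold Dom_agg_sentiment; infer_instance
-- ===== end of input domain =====

-- B replaces A's single branching loop over a mutable dict with three independent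
-- filtered-count passes; same O(n) cost, different decomposition (objective: alternative).

-- ===== PORT A =====
def agg_sentiment (sentiment : List Int) : List (String × Int) :=
  (sentiment.foldl (fun d s =>
      if s > 0 then d.modify "positive" 0 (· + 1)
      else if s < 0 then d.modify "negative" 0 (· + 1)
      else d.modify "neutral" 0 (· + 1))
    (PySem.Dict.ofList [("positive", (0 : Int)), ("negative", 0), ("neutral", 0)])).items

-- ===== PORT B =====
def agg_sentiment_alt (sentiment : List Int) : List (String × Int) :=
  [("positive", ((sentiment.filter (fun s => decide (s > 0))).length : Int)),
   ("negative", ((sentiment.filter (fun s => decide (s < 0))).length : Int)),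
   ("neutral", ((sentiment.filter (fun s => !(decide (s > 0) || decide (s < 0)))).length : Int))]

-- ===== PRECONDITION & SPEC =====
def Spec_agg_sentiment (sentiment : List Int) (out : List (String × Int)) : Prop := out = agg_sentiment_alt sentiment
instance (sentiment : List Int) (out : List (String × Int)) : Decidable (Spec_agg_sentiment sentiment out) := by unfold Spec_agg_sentiment; infer_instance

-- ===== CLAIM (what is proved, stated in full; the proofs are below) =====
def Claim_equal_agg_sentiment : Prop := ∀ (sentiment : List Int), Dom_agg_sentiment sentiment → Spec_agg_sentiment sentiment (agg_sentiment sentiment)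

-- ===== LEMMAS AND PROOFS =====

theorem agg_loop_items (l : List Int) (p n z : Int) :
    (l.foldl (fun d s =>
        if s > 0 then d.modify "positive" 0 (· + 1)
        else if s < 0 then d.modify "negative" 0 (· + 1)
        else d.modify "neutral" 0 (· + 1))
      (PySem.Dict.mk [("positive", p), ("negative", n), ("neutral", z)])).items =
    [("positive", p + ((l.filter (fun s => decide (s > 0))).length : Int)),
     ("negative", n + ((l.filter (fun s => decide (s < 0))).length : Int)),
     ("neutral", z + ((l.filter (fun s => !(decide (s > 0) || decide (s < 0)))).length : Int))] := by
  induction l generalizing p n z with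
  | nil => simp
  | cons x xs ih =>
    simp only [List.foldl_cons, List.filter_cons]
    have hmodP : ({ items := [("positive", p), ("negative", n), ("neutral", z)] } : PySem.Dict String Int).modify "positive" 0 (· + 1) = { items := [("positive", p + 1), ("negative", n), ("neutral", z)] } := by
      simp [PySem.Dict.modify, PySem.Dict.insert, PySem.Dict.getD, PySem.Dict.get?, PySem.Dict.contains]
    have hmodN : ({ items := [("positive", p), ("negative", n), ("neutral", z)] } : PySem.Dict String Int).modify "negative" 0 (· + 1) = { items := [("positive", p), ("negative", n + 1), ("neutral", z)] } := by
      simp [PySem.Dict.modify, PySem.Dict.insert, PySem.Dict.getD, PySem.Dict.get?, PySem.Dict.contains]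
    have hmodZ : ({ items := [("positive", p), ("negative", n), ("neutral", z)] } : PySem.Dict String Int).modify "neutral" 0 (· + 1) = { items := [("positive", p), ("negative", n), ("neutral", z + 1)] } := by
      simp [PySem.Dict.modify, PySem.Dict.insert, PySem.Dict.getD, PySem.Dict.get?, PySem.Dict.contains]
    by_cases hx : x > 0
    · have hx' : ¬ x < 0 := by omega
      rw [if_pos hx, hmodP, ih]
      simp only [hx, hx', decide_true, decide_false]
      simp [List.length_cons]
      omega
    · by_cases hn : x < 0
      · rw [if_neg hx, if_pos hn, hmodN, ih]
        simp only [hx, hn, decide_true, decide_false]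
        simp [List.length_cons]
        omega
      · rw [if_neg hx, if_neg hn, hmodZ, ih]
        simp only [hx, hn, decide_false]
        simp [List.length_cons]
        omega

-- ===== VERDICT (by name: the statement is the Claim_ definition above) =====
theorem agg_sentiment_spec : Claim_equal_agg_sentiment := by
  intro sentiment _
  show agg_sentiment sentiment = agg_sentiment_alt sentiment
  unfold agg_sentiment agg_sentiment_alt
  have hof : (PySem.Dict.ofList [("positive", (0 : Int)), ("negative", 0), ("neutral", 0)] : PySem.Dict String Int)
      = { items := [("positive", 0), ("negative", 0), ("neutral", 0)] } := by decide
  rw [hof, agg_loop_items]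
  simp
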